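-- pv_equiv track=rewrite | github.com/gundemkorel/LLM_ENV | src/debate_rl/training/setup.py | _parse_prompts_without_yaml
-- ===== SOURCE A (Python) =====
-- from typing import Any, Awaitable, Callable, Dict
--
-- def _parse_prompts_without_yaml(text: str) -> Dict[str, str]:
--     prompts: Dict[str, str] = {}
--     current_key: str | None = None
--     buffer: list[str] = []
--     in_block = False
--     for raw_line in text.splitlines():
--         line = raw_line.rstrip("\n")
--         if current_key is None:
--             if ":" not in line:
--                 continue
--             key, remainder = line.split(":", 1)
--             key = key.strip()
--             remainder = remainder.strip()
--             if remainder == "|":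
--                 current_key = key
--                 buffer = []
--                 in_block = True
--             else:
--                 prompts[key] = remainder
--         else:
--             if line.startswith("  "):
--                 buffer.append(line[2:])
--             elif line.strip() == "":
--                 buffer.append("")
--             else:
--                 prompts[current_key] = "\n".join(buffer).rstrip()
--                 current_key = None
--                 in_block = False
--                 if ":" in line:
--                     key, remainder = line.split(":", 1)
--                     key = key.strip()
--                     remainder = remainder.strip()
--                     if remainder == "|":
--                         current_key = key
--                         buffer = []
--                         in_block = True
--                     else:
--                         prompts[key] = remainder
--     if current_key is not None and in_block:
--         prompts[current_key] = "\n".join(buffer).rstrip()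
--     return prompts
-- ===== SOURCE B (Python) =====
-- def _parse_prompts_without_yaml(text: str):
--     prompts = {}
--     lines = text.splitlines()
--     i = 0
--     n = len(lines)
--     while i < n:
--         line = lines[i]
--         i += 1
--         if ":" not in line:
--             continue
--         key, remainder = line.split(":", 1)
--         key = key.strip()
--         remainder = remainder.strip()
--         if remainder == "|":
--             buf = []
--             while i < n:
--                 nxt = lines[i]
--                 if nxt.startswith("  "):
--                     buf.append(nxt[2:])
--                 elif nxt.strip() == "":
--                     buf.append("")
--                 else:
--                     break
--                 i += 1
--             prompts[key] = "\n".join(buf).rstrip()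
--         else:
--             prompts[key] = remainder
--     return prompts
-- ===== Notes on version B (the rewrite author's own statement) =====
-- stated objective: simpler
-- what changed: Replaced A's flat one-pass state machine (current_key/buffer/in_block flags with a duplicated key-parsing site and a final flush) by an indexed while loop that parses each key:value line in one place and consumes a block-literal value with a nested inner loop, leaving the terminating line to be reprocessed.
import Mathlib
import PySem

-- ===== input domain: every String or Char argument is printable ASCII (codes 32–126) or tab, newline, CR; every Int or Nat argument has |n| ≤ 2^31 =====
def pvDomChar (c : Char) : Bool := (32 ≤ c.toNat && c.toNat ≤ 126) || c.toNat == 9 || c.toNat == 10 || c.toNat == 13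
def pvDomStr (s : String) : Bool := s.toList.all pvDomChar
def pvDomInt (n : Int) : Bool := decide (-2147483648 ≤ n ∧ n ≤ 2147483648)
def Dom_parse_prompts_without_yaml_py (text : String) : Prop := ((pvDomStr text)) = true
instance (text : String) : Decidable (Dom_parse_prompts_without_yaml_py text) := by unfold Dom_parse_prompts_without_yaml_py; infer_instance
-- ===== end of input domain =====

-- B replaces A's flat state machine (with its duplicated key-parsing site) by an outer loop over the
-- lines with a nested loop consuming a '|' block; same output, simpler decomposition (objective: simpler).

-- ===== PORT A =====
-- hand-port of `raw_line.rstrip("\n")` (drop trailing '\n' code points); exact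
def pvRstripNl (s : String) : String :=
  String.ofList ((s.toList.reverse.dropWhile (fun c => c == '\n')).reverse)

-- one iteration of A's for-loop; state = (prompts, current_key, buffer, in_block)
def pvAStep (st : PySem.Dict String String × Option String × List String × Bool)
    (raw_line : String) : PySem.Dict String String × Option String × List String × Bool :=
  let line := pvRstripNl raw_line
  match st with
  | (prompts, none, buffer, in_block) =>
    if PySem.Str.isIn ":" line then
      match PySem.Str.splitMax? line ":" 1 with
      | some (k :: r :: _) =>
        let key := PySem.Str.strip k
        let remainder := PySem.Str.strip r
        if remainder = "|" then (prompts, some key, [], true)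
        else (prompts.insert key remainder, none, buffer, in_block)
      | _ => (prompts, none, buffer, in_block)   -- unreachable: ':' in line yields two pieces
    else (prompts, none, buffer, in_block)
  | (prompts, some current_key, buffer, in_block) =>
    if PySem.Str.startswith line "  " then
      (prompts, some current_key, buffer ++ [PySem.Str.slice line (some 2) none], in_block)
    else if PySem.Str.strip line = "" then
      (prompts, some current_key, buffer ++ [""], in_block)
    else
      let prompts' := prompts.insert current_key (PySem.Str.rstrip (PySem.Str.join "\n" buffer))
      if PySem.Str.isIn ":" line then
        match PySem.Str.splitMax? line ":" 1 with
        | some (k :: r :: _) =>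
          let key := PySem.Str.strip k
          let remainder := PySem.Str.strip r
          if remainder = "|" then (prompts', some key, [], true)
          else (prompts'.insert key remainder, none, buffer, false)
        | _ => (prompts', none, buffer, false)
      else (prompts', none, buffer, false)

def parse_prompts_without_yaml_py (text : String) : List (String × String) :=
  match (PySem.Str.splitlines text).foldl pvAStep (PySem.Dict.empty, none, [], false) with
  | (prompts, some current_key, buffer, in_block) =>
    if in_block then
      (prompts.insert current_key (PySem.Str.rstrip (PySem.Str.join "\n" buffer))).items
    else prompts.items
  | (prompts, none, _, _) => prompts.items

-- ===== PORT B =====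
-- the inner while loop: consume the lines of a block-literal value, return (buffer, remaining lines starting at the terminator)
def pvTakeBlock : List String → List String → List String × List String
  | [], buffer => (buffer, [])
  | line :: rest, buffer =>
    if PySem.Str.startswith line "  " then
      pvTakeBlock rest (buffer ++ [PySem.Str.slice line (some 2) none])
    else if PySem.Str.strip line = "" then
      pvTakeBlock rest (buffer ++ [""])
    else (buffer, line :: rest)

theorem pvTakeBlock_snd_length (ls : List String) : ∀ buffer, (pvTakeBlock ls buffer).2.length ≤ ls.length := by
  induction ls with
  | nil => intro buffer; simp [pvTakeBlock]
  | cons line rest ih =>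
    intro buffer
    simp only [pvTakeBlock]
    split_ifs with h1 h2
    · exact le_trans (ih _) (by simp)
    · exact le_trans (ih _) (by simp)
    · simp

-- the outer while loop over the remaining lines
def pvBGo : List String → PySem.Dict String String → PySem.Dict String String
  | [], prompts => prompts
  | line :: rest, prompts =>
    if PySem.Str.isIn ":" line then
      match PySem.Str.splitMax? line ":" 1 with
      | some (k :: r :: _) =>
        let key := PySem.Str.strip k
        let remainder := PySem.Str.strip r
        if remainder = "|" then
          let p := pvTakeBlock rest []
          pvBGo p.2 (prompts.insert key (PySem.Str.rstrip (PySem.Str.join "\n" p.1)))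
        else pvBGo rest (prompts.insert key remainder)
      | _ => pvBGo rest prompts
    else pvBGo rest prompts
termination_by ls _ => ls.length
decreasing_by
  · exact Nat.lt_succ_of_le (pvTakeBlock_snd_length rest [])
  all_goals exact Nat.lt_succ_self _

def parse_prompts_without_yaml_py_alt (text : String) : List (String × String) :=
  (pvBGo (PySem.Str.splitlines text) PySem.Dict.empty).items

-- ===== PRECONDITION & SPEC =====
def Spec_parse_prompts_without_yaml_py (text : String) (out : List (String × String)) : Prop := out = parse_prompts_without_yaml_py_alt text
instance (text : String) (out : List (String × String)) : Decidable (Spec_parse_prompts_without_yaml_py text out) := by unfold Spec_parse_prompts_without_yaml_py; infer_instance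

-- ===== CLAIM (what is proved, stated in full; the proofs are below) =====
def Claim_equal_parse_prompts_without_yaml_py : Prop := ∀ (text : String), Dom_parse_prompts_without_yaml_py text → Spec_parse_prompts_without_yaml_py text (parse_prompts_without_yaml_py text)

-- ===== LEMMAS AND PROOFS =====

-- A's end-of-loop flush, as a function of the loop state
def pvFinalize (st : PySem.Dict String String × Option String × List String × Bool) :
    PySem.Dict String String :=
  match st with
  | (prompts, some current_key, buffer, true) =>
    prompts.insert current_key (PySem.Str.rstrip (PySem.Str.join "\n" buffer))
  | (prompts, some _, _, false) => prompts
  | (prompts, none, _, _) => prompts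

theorem pvA_eq_finalize (text : String) :
    parse_prompts_without_yaml_py text =
      (pvFinalize ((PySem.Str.splitlines text).foldl pvAStep (PySem.Dict.empty, none, [], false))).items := by
  unfold parse_prompts_without_yaml_py
  rcases (PySem.Str.splitlines text).foldl pvAStep (PySem.Dict.empty, none, [], false) with ⟨d, ck, buf, inb⟩
  rcases ck with _ | ck <;> rcases inb <;> simp [pvFinalize]

-- no line produced by splitlines contains '\n'
theorem pvGo_no_nl (isB : Char → Bool) (hnl : isB '\n' = true) :
    ∀ (m : Nat) (s cur : List Char) (acc : List (List Char)), s.length ≤ m →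
    '\n' ∉ cur → (∀ l ∈ acc, '\n' ∉ l) →
    ∀ l ∈ PySem.Chars.splitlines.go isB s cur acc, '\n' ∉ l := by
  intro m
  induction m with
  | zero =>
    intro s cur acc hs hcur hacc
    have hs0 : s = [] := by cases s <;> simp_all
    subst hs0
    rw [PySem.Chars.splitlines.go.eq_def]
    split
    · split
      · intro l hl; rw [List.mem_reverse] at hl; exact hacc l hl
      · intro l hl
        rw [List.mem_reverse] at hl
        rcases List.mem_cons.mp hl with rfl | h
        · rw [List.mem_reverse]; exact hcur
        · exact hacc l h
    · rename_i heq; cases heq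
    · rename_i heq; cases heq
  | succ m ih =>
    intro s cur acc hs hcur hacc
    rw [PySem.Chars.splitlines.go.eq_def]
    split
    · split
      · intro l hl; rw [List.mem_reverse] at hl; exact hacc l hl
      · intro l hl
        rw [List.mem_reverse] at hl
        rcases List.mem_cons.mp hl with rfl | h
        · rw [List.mem_reverse]; exact hcur
        · exact hacc l h
    · -- s = '\r' :: '\n' :: rest
      apply ih _ [] _ ?_ (by simp) ?_
      · simp at hs; omega
      · intro l hl
        rcases List.mem_cons.mp hl with rfl | h
        · rw [List.mem_reverse]; exact hcur
        · exact hacc l h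
    · -- s = c :: rest, not a CRLF pair
      split
      · apply ih _ [] _ ?_ (by simp) ?_
        · simp at hs; omega
        · intro l hl
          rcases List.mem_cons.mp hl with rfl | h
          · rw [List.mem_reverse]; exact hcur
          · exact hacc l h
      · rename_i hc
        apply ih _ _ _ ?_ ?_ hacc
        · simp at hs; omega
        · intro hmem
          rcases List.mem_cons.mp hmem with h | h
          · apply hc; rw [← h]; exact hnl
          · exact hcur h

theorem pv_splitlines_no_nl (text : String) :
    ∀ l ∈ PySem.Str.splitlines text, pvRstripNl l = l := by
  intro l hl
  simp only [PySem.Str.splitlines, List.mem_map] at hl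
  obtain ⟨cs, hcs, rfl⟩ := hl
  have hnl : '\n' ∉ cs := by
    revert hcs
    simp only [PySem.Chars.splitlines]
    intro hcs
    exact pvGo_no_nl _ (by decide) text.toList.length text.toList [] [] le_rfl (by simp) (by simp) cs hcs
  have hdrop : cs.reverse.dropWhile (fun c => c == '\n') = cs.reverse := by
    cases h : cs.reverse with
    | nil => simp
    | cons c t =>
      have hc : c ∈ cs := List.mem_reverse.mp (h ▸ List.mem_cons_self ..)
      have : (c == '\n') = false := by
        simp only [beq_eq_false_iff_ne]; rintro rfl; exact hnl hc
      simp [this]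
  simp [pvRstripNl, hdrop]

-- main invariant: A's loop + flush equals B's nested loops, for any list of '\n'-free lines
theorem pvMain : ∀ (n : Nat) (lines : List String), lines.length ≤ n →
    (∀ l ∈ lines, pvRstripNl l = l) →
    ((∀ d buf inb, pvFinalize (lines.foldl pvAStep (d, none, buf, inb)) = pvBGo lines d)
    ∧ (∀ d ck buf, pvFinalize (lines.foldl pvAStep (d, some ck, buf, true)) =
        pvBGo (pvTakeBlock lines buf).2
          (d.insert ck (PySem.Str.rstrip (PySem.Str.join "\n" (pvTakeBlock lines buf).1))))) := by
  intro n
  induction n with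
  | zero =>
    intro lines hlen _
    have : lines = [] := by cases lines <;> simp_all
    subst this
    exact ⟨fun d buf inb => by simp [pvFinalize, pvBGo],
           fun d ck buf => by simp [pvFinalize, pvBGo, pvTakeBlock]⟩
  | succ n ih =>
    intro lines hlen hnl
    cases lines with
    | nil =>
      exact ⟨fun d buf inb => by simp [pvFinalize, pvBGo],
             fun d ck buf => by simp [pvFinalize, pvBGo, pvTakeBlock]⟩
    | cons line rest =>
      have hline : pvRstripNl line = line := hnl line (by simp)
      have hrest : ∀ l ∈ rest, pvRstripNl l = l := fun l hl => hnl l (by simp [hl])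
      have hlen' : rest.length ≤ n := by simp at hlen; omega
      obtain ⟨ih1, ih2⟩ := ih rest hlen' hrest
      constructor
      · intro d buf inb
        simp only [List.foldl_cons, pvAStep, hline]
        by_cases h : PySem.Str.isIn ":" line = true
        · rw [pvBGo]
          simp only [h, if_true]
          cases hs : PySem.Str.splitMax? line ":" 1 with
          | none => simpa using ih1 d buf inb
          | some ps =>
            match ps with
            | [] => simpa using ih1 d buf inb
            | [k] => simpa using ih1 d buf inb
            | k :: r :: rs =>
              by_cases hrem : PySem.Str.strip r = "|"
              · simpa [hrem] using ih2 d (PySem.Str.strip k) []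
              · simpa [hrem] using ih1 (d.insert (PySem.Str.strip k) (PySem.Str.strip r)) buf inb
        · rw [pvBGo]
          simp only [h, if_false, Bool.false_eq_true]
          simpa using ih1 d buf inb
      · intro d ck buf
        simp only [List.foldl_cons, pvAStep, hline]
        by_cases h1 : PySem.Str.startswith line "  " = true
        · have hsw : PySem.Chars.startswith line.toList [' ', ' '] = true := by
            exact h1
          rw [show pvTakeBlock (line :: rest) buf
              = pvTakeBlock rest (buf ++ [PySem.Str.slice line (some 2) none]) by
                simp [pvTakeBlock, hsw]]
          simpa [hsw] using ih2 d ck (buf ++ [PySem.Str.slice line (some 2) none])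
        · have hsw : PySem.Chars.startswith line.toList [' ', ' '] = false := by
            exact Bool.not_eq_true _ ▸ h1
          by_cases h2 : PySem.Str.strip line = ""
          · rw [show pvTakeBlock (line :: rest) buf = pvTakeBlock rest (buf ++ [""]) by
                simp [pvTakeBlock, hsw, h2]]
            simpa [hsw, h2] using ih2 d ck (buf ++ [""])
          · rw [show pvTakeBlock (line :: rest) buf = (buf, line :: rest) by
                simp [pvTakeBlock, hsw, h2]]
            rw [pvBGo]
            by_cases h : PySem.Str.isIn ":" line = true
            · have hin : PySem.Chars.isIn [':'] line.toList = true := by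
                exact h
              cases hs : PySem.Str.splitMax? line ":" 1 with
              | none =>
                simpa [hsw, h2, h, hin, hs] using
                  ih1 (d.insert ck (PySem.Str.rstrip (PySem.Str.join "\n" buf))) buf false
              | some ps =>
                match ps with
                | [] =>
                  simpa [hsw, h2, h, hin, hs] using
                    ih1 (d.insert ck (PySem.Str.rstrip (PySem.Str.join "\n" buf))) buf false
                | [k] =>
                  simpa [hsw, h2, h, hin, hs] using
                    ih1 (d.insert ck (PySem.Str.rstrip (PySem.Str.join "\n" buf))) buf false
                | k :: r :: rs =>
                  by_cases hrem : PySem.Str.strip r = "|"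
                  · simpa [hsw, h2, h, hin, hs, hrem] using
                      ih2 (d.insert ck (PySem.Str.rstrip (PySem.Str.join "\n" buf)))
                        (PySem.Str.strip k) []
                  · simpa [hsw, h2, h, hin, hs, hrem] using
                      ih1 ((d.insert ck (PySem.Str.rstrip (PySem.Str.join "\n" buf))).insert
                        (PySem.Str.strip k) (PySem.Str.strip r)) buf false
            · have hin : PySem.Chars.isIn [':'] line.toList = false := by
                exact Bool.not_eq_true _ ▸ h
              simpa [hsw, h2, h, hin] using
                ih1 (d.insert ck (PySem.Str.rstrip (PySem.Str.join "\n" buf))) buf false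

-- ===== VERDICT (by name: the statement is the Claim_ definition above) =====
theorem parse_prompts_without_yaml_py_spec : Claim_equal_parse_prompts_without_yaml_py := by
  intro text _
  unfold Spec_parse_prompts_without_yaml_py parse_prompts_without_yaml_py_alt
  rw [pvA_eq_finalize]
  rw [(pvMain (PySem.Str.splitlines text).length (PySem.Str.splitlines text) le_rfl
      (pv_splitlines_no_nl text)).1 PySem.Dict.empty [] false]
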